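-- pv_equiv track=rewrite | github.com/3ndym10n/ai-agent-onboarding-lite | ai_onboard/core/ai_integration/clarification_question_system.py | _analyze_missing_information
-- ===== SOURCE A (Python) =====
-- from typing import Any, Dict, List, Set
--
-- def _analyze_missing_information(
--     user_request: str, context: Dict[str, Any]
-- ) -> List[str]:
--     """Analyze what information is missing from the user request."""
--     missing_info = []
--
--     # Check for missing project scope
--     if not any(
--         word in user_request.lower()
--         for word in ["small", "simple", "basic", "minimal"]
--     ):
--         if not any(
--             word in user_request.lower()
--             for word in ["large", "complex", "enterprise", "comprehensive"]
--         ):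
--             missing_info.append("scope")
--
--     # Check for missing timeline
--     if not any(
--         word in user_request.lower()
--         for word in ["time", "deadline", "when", "soon", "quick"]
--     ):
--         missing_info.append("timeline")
--
--     # Check for missing budget
--     if not any(
--         word in user_request.lower()
--         for word in ["budget", "cost", "price", "money", "free"]
--     ):
--         missing_info.append("budget")
--
--     # Check for missing technical requirements
--     if not any(
--         word in user_request.lower()
--         for word in ["technology", "tech", "platform", "database"]
--     ):
--         missing_info.append("technical")
--
--     # Check for missing target audience
--     if not any(
--         word in user_request.lower()
--         for word in ["user", "customer", "audience", "people"]
--     ):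
--         missing_info.append("audience")
--
--     return missing_info
-- ===== SOURCE B (Python) =====
-- # B: single left-to-right scan over the lowered request -- at each position we
-- # match keywords by startswith (a multi-pattern scan), collecting the set of
-- # categories whose keyword occurs; the answer is the fixed category order minus
-- # that set. Objective: alternative (different algorithm: position scan vs
-- # per-category substring searches).
-- _WORD_CATS = [
--     ("small", "scope"), ("simple", "scope"), ("basic", "scope"), ("minimal", "scope"),
--     ("large", "scope"), ("complex", "scope"), ("enterprise", "scope"), ("comprehensive", "scope"),
--     ("time", "timeline"), ("deadline", "timeline"), ("when", "timeline"), ("soon", "timeline"), ("quick", "timeline"),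
--     ("budget", "budget"), ("cost", "budget"), ("price", "budget"), ("money", "budget"), ("free", "budget"),
--     ("technology", "technical"), ("tech", "technical"), ("platform", "technical"), ("database", "technical"),
--     ("user", "audience"), ("customer", "audience"), ("audience", "audience"), ("people", "audience"),
-- ]
-- _ORDER = ["scope", "timeline", "budget", "technical", "audience"]
--
--
-- def _analyze_missing_information(user_request, context):
--     low = user_request.lower()
--     found = set()
--     for i in range(len(low) + 1):
--         suffix = low[i:]
--         for word, cat in _WORD_CATS:
--             if cat not in found and suffix.startswith(word):
--                 found.add(cat)
--     return [cat for cat in _ORDER if cat not in found]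
-- ===== Notes on version B (the rewrite author's own statement) =====
-- stated objective: alternative
-- what changed: Replaced five independent any-substring-in-request checks (with a nested double-any for scope) by a single left-to-right scan over the lowered request that matches a flat (keyword, category) table by startswith at each position, collects the set of found categories, and returns the fixed category order minus that set.
import Mathlib
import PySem

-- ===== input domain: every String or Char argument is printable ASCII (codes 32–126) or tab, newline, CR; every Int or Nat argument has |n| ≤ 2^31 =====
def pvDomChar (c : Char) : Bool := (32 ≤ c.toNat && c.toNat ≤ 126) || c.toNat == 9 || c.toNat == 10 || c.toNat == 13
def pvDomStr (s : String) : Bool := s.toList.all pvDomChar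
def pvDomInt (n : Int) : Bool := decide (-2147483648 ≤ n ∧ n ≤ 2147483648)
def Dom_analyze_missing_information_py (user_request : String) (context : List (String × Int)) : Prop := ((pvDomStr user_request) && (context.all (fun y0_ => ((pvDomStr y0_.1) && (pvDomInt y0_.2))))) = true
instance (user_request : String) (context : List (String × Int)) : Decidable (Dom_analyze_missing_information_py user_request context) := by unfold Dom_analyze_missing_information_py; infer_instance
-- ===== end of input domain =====

-- B replaces per-category any-substring checks by one left-to-right position scan matching a flat (keyword, category) table by startswith, collecting found categories as a set; objective: alternative.
-- ===== PORT A =====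
def analyze_missing_information_py (user_request : String) (context : List (String × Int)) : List String :=
  let missing_info : List String := []
  let missing_info :=
    if ¬ (["small", "simple", "basic", "minimal"].any
        (fun word => PySem.Str.isIn word (PySem.Str.lower user_request))) then
      if ¬ (["large", "complex", "enterprise", "comprehensive"].any
          (fun word => PySem.Str.isIn word (PySem.Str.lower user_request))) then
        missing_info ++ ["scope"]
      else missing_info
    else missing_info
  let missing_info :=
    if ¬ (["time", "deadline", "when", "soon", "quick"].any
        (fun word => PySem.Str.isIn word (PySem.Str.lower user_request))) then
      missing_info ++ ["timeline"]
    else missing_info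
  let missing_info :=
    if ¬ (["budget", "cost", "price", "money", "free"].any
        (fun word => PySem.Str.isIn word (PySem.Str.lower user_request))) then
      missing_info ++ ["budget"]
    else missing_info
  let missing_info :=
    if ¬ (["technology", "tech", "platform", "database"].any
        (fun word => PySem.Str.isIn word (PySem.Str.lower user_request))) then
      missing_info ++ ["technical"]
    else missing_info
  let missing_info :=
    if ¬ (["user", "customer", "audience", "people"].any
        (fun word => PySem.Str.isIn word (PySem.Str.lower user_request))) then
      missing_info ++ ["audience"]
    else missing_info
  missing_info

-- ===== PORT B =====
def pvWordCats : List (String × String) :=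
  [("small", "scope"), ("simple", "scope"), ("basic", "scope"), ("minimal", "scope"),
   ("large", "scope"), ("complex", "scope"), ("enterprise", "scope"), ("comprehensive", "scope"),
   ("time", "timeline"), ("deadline", "timeline"), ("when", "timeline"), ("soon", "timeline"), ("quick", "timeline"),
   ("budget", "budget"), ("cost", "budget"), ("price", "budget"), ("money", "budget"), ("free", "budget"),
   ("technology", "technical"), ("tech", "technical"), ("platform", "technical"), ("database", "technical"),
   ("user", "audience"), ("customer", "audience"), ("audience", "audience"), ("people", "audience")]

def pvOrder : List String := ["scope", "timeline", "budget", "technical", "audience"]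

-- low[i:] with the nonnegative i from range(len(low)+1) (exact: PySem.List.slice on the code points);
-- suffix.startswith(word) is PySem.Chars.startswith; found is a Python set (PySem.Set).
def analyze_missing_information_py_alt (user_request : String) (context : List (String × Int)) : List String :=
  let low := (PySem.Str.lower user_request).toList
  let found : PySem.Set String :=
    (PySem.List.pyRange 0 ((low.length : Int) + 1) 1).foldl
      (fun found i =>
        let suffix := PySem.List.slice low (some i) none
        pvWordCats.foldl
          (fun found p =>
            if !(PySem.Set.contains found p.2) && PySem.Chars.startswith suffix p.1.toList then
              PySem.Set.add found p.2
            else found)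
          found)
      PySem.Set.empty
  pvOrder.filter (fun cat => !(PySem.Set.contains found cat))

-- ===== PRECONDITION & SPEC =====
def Spec_analyze_missing_information_py (user_request : String) (context : List (String × Int)) (out : List String) : Prop := out = analyze_missing_information_py_alt user_request context
instance (user_request : String) (context : List (String × Int)) (out : List String) : Decidable (Spec_analyze_missing_information_py user_request context out) := by unfold Spec_analyze_missing_information_py; infer_instance

-- ===== CLAIM (what is proved, stated in full; the proofs are below) =====
def Claim_equal_analyze_missing_information_py : Prop := ∀ (user_request : String) (context : List (String × Int)), Dom_analyze_missing_information_py user_request context → Spec_analyze_missing_information_py user_request context (analyze_missing_information_py user_request context)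

-- ===== LEMMAS AND PROOFS =====

-- membership after the inner fold over the word table
theorem pv_mem_inner (L : List (String × String)) (suffix : List Char)
    (s : PySem.Set String) (c : String) :
    c ∈ L.foldl
      (fun found p =>
        if !(PySem.Set.contains found p.2) && PySem.Chars.startswith suffix p.1.toList then
          PySem.Set.add found p.2
        else found) s
    ↔ c ∈ s ∨ ∃ p ∈ L, p.2 = c ∧ PySem.Chars.startswith suffix p.1.toList = true := by
  induction L generalizing s with
  | nil => simp
  | cons p L ih =>
    simp only [List.foldl_cons, List.mem_cons]
    by_cases hc : PySem.Set.contains s p.2 = true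
    · have hmem : p.2 ∈ s := (PySem.Set.contains_iff s p.2).mp hc
      rw [if_neg (by simp only [hc, Bool.not_true, Bool.false_and]; exact Bool.false_ne_true), ih]
      constructor
      · rintro (h | h)
        · exact Or.inl h
        · exact Or.inr ⟨h.choose, Or.inr h.choose_spec.1, h.choose_spec.2⟩
      · rintro (h | ⟨q, hq, hqc, hqs⟩)
        · exact Or.inl h
        · rcases hq with rfl | hq
          · exact Or.inl (hqc ▸ hmem)
          · exact Or.inr ⟨q, hq, hqc, hqs⟩
    · by_cases hs : PySem.Chars.startswith suffix p.1.toList = true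
      · have hc' : PySem.Set.contains s p.2 = false := eq_false_of_ne_true hc
        rw [if_pos (by rw [hc', hs]; rfl), ih]
        simp only [PySem.Set.mem_add]
        constructor
        · rintro (⟨h | rfl⟩ | h)
          · exact Or.inl h
          · exact Or.inr ⟨p, Or.inl rfl, rfl, hs⟩
          · exact Or.inr ⟨h.choose, Or.inr h.choose_spec.1, h.choose_spec.2⟩
        · rintro (h | ⟨q, hq, hqc, hqs⟩)
          · exact Or.inl (Or.inl h)
          · rcases hq with rfl | hq
            · exact Or.inl (Or.inr hqc.symm)
            · exact Or.inr ⟨q, hq, hqc, hqs⟩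
      · have hs' : PySem.Chars.startswith suffix p.1.toList = false := eq_false_of_ne_true hs
        rw [if_neg (by simp [hs']), ih]
        constructor
        · rintro (h | h)
          · exact Or.inl h
          · exact Or.inr ⟨h.choose, Or.inr h.choose_spec.1, h.choose_spec.2⟩
        · rintro (h | ⟨q, hq, hqc, hqs⟩)
          · exact Or.inl h
          · rcases hq with rfl | hq
            · exact absurd hqs hs
            · exact Or.inr ⟨q, hq, hqc, hqs⟩

-- membership after the outer fold over the positions
theorem pv_mem_outer (low : List Char) (is : List Int) (s : PySem.Set String) (c : String) :
    c ∈ is.foldl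
      (fun found i =>
        pvWordCats.foldl
          (fun found p =>
            if !(PySem.Set.contains found p.2) &&
                PySem.Chars.startswith (PySem.List.slice low (some i) none) p.1.toList then
              PySem.Set.add found p.2
            else found) found) s
    ↔ c ∈ s ∨ ∃ i ∈ is, ∃ p ∈ pvWordCats, p.2 = c ∧
        PySem.Chars.startswith (PySem.List.slice low (some i) none) p.1.toList = true := by
  induction is generalizing s with
  | nil => simp
  | cons i is ih =>
    simp only [List.foldl_cons, List.mem_cons]
    rw [ih, pv_mem_inner]
    constructor
    · rintro ((h | ⟨p, hp, hpc, hps⟩) | ⟨j, hj, h⟩)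
      · exact Or.inl h
      · exact Or.inr ⟨i, Or.inl rfl, p, hp, hpc, hps⟩
      · exact Or.inr ⟨j, Or.inr hj, h⟩
    · rintro (h | ⟨j, hj, h⟩)
      · exact Or.inl (Or.inl h)
      · rcases hj with rfl | hj
        · exact Or.inl (Or.inr h)
        · exact Or.inr ⟨j, hj, h⟩

-- a nonempty word starts at some scanned position iff it is a substring
theorem pv_exists_pos_iff (low : List Char) (w : List Char) (hw : w ≠ []) :
    (∃ i ∈ PySem.List.pyRange 0 ((low.length : Int) + 1) 1,
        PySem.Chars.startswith (PySem.List.slice low (some i) none) w = true)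
    ↔ PySem.Chars.isIn w low = true := by
  rw [← PySem.Chars.exists_prefix_drop_iff_isIn]
  constructor
  · rintro ⟨i, hi, hs⟩
    rw [PySem.List.mem_pyRange_one] at hi
    rw [PySem.List.slice_from low hi.1] at hs
    exact ⟨i.toNat, (PySem.Chars.startswith_iff _ _).mp hs⟩
  · rintro ⟨j, hj⟩
    by_cases hle : j ≤ low.length
    · refine ⟨(j : Int), ?_, ?_⟩
      · rw [PySem.List.mem_pyRange_one]; omega
      · rw [PySem.List.slice_from low (by positivity)]
        simpa using (PySem.Chars.startswith_iff _ _).mpr hj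
    · exfalso
      rw [List.drop_eq_nil_of_le (by omega)] at hj
      exact hw (List.prefix_nil.mp hj)

-- every keyword in the table is nonempty
theorem pv_words_ne_nil : ∀ p ∈ pvWordCats, p.1.toList ≠ [] := by decide

-- final membership characterisation: a category is found iff one of its words is a substring
theorem pv_mem_found (low : List Char) (c : String) :
    c ∈ ((PySem.List.pyRange 0 ((low.length : Int) + 1) 1).foldl
      (fun found i =>
        pvWordCats.foldl
          (fun found p =>
            if !(PySem.Set.contains found p.2) &&
                PySem.Chars.startswith (PySem.List.slice low (some i) none) p.1.toList then
              PySem.Set.add found p.2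
            else found) found) (PySem.Set.empty : PySem.Set String))
    ↔ ∃ p ∈ pvWordCats, p.2 = c ∧ PySem.Chars.isIn p.1.toList low = true := by
  rw [pv_mem_outer]
  constructor
  · rintro (h | ⟨i, hi, p, hp, hpc, hps⟩)
    · simp [PySem.Set.empty] at h
    · exact ⟨p, hp, hpc, (pv_exists_pos_iff low p.1.toList (pv_words_ne_nil p hp)).mp ⟨i, hi, hps⟩⟩
  · rintro ⟨p, hp, hpc, hps⟩
    obtain ⟨i, hi, hs⟩ := (pv_exists_pos_iff low p.1.toList (pv_words_ne_nil p hp)).mpr hps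
    exact Or.inr ⟨i, hi, p, hp, hpc, hs⟩

-- ===== VERDICT (by name: the statement is the Claim_ definition above) =====
set_option maxHeartbeats 4000000 in
theorem analyze_missing_information_py_spec : Claim_equal_analyze_missing_information_py := by
  intro user_request context hdom
  clear hdom
  unfold Spec_analyze_missing_information_py
  unfold analyze_missing_information_py analyze_missing_information_py_alt
  simp only []
  set low := (PySem.Str.lower user_request).toList with hlow
  set found := ((PySem.List.pyRange 0 ((low.length : Int) + 1) 1).foldl
      (fun found i =>
        pvWordCats.foldl
          (fun found p =>
            if !(PySem.Set.contains found p.2) &&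
                PySem.Chars.startswith (PySem.List.slice low (some i) none) p.1.toList then
              PySem.Set.add found p.2
            else found) found) (PySem.Set.empty : PySem.Set String)) with hfound
  have hc : ∀ c : String, PySem.Set.contains found c =
      pvWordCats.any (fun p => decide (p.2 = c) && PySem.Chars.isIn p.1.toList low) := by
    intro c
    rw [Bool.eq_iff_iff, PySem.Set.contains_iff, hfound, pv_mem_found]
    simp [pvWordCats]
  simp only [pvOrder, List.filter_cons, List.filter_nil, hc]
  simp only [pvWordCats, List.any_cons, List.any_nil, PySem.Str.isIn_eq, ← hlow]
  clear hc hfound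
  clear_value found
  clear found
  clear_value low
  clear hlow
  simp only [Bool.or_false, Bool.false_or, Bool.false_and,
    Bool.true_and, String.reduceEq, decide_true, decide_false]
  generalize PySem.Chars.isIn "small".toList low = x1
  generalize PySem.Chars.isIn "simple".toList low = x2
  generalize PySem.Chars.isIn "basic".toList low = x3
  generalize PySem.Chars.isIn "minimal".toList low = x4
  generalize PySem.Chars.isIn "large".toList low = x5
  generalize PySem.Chars.isIn "complex".toList low = x6
  generalize PySem.Chars.isIn "enterprise".toList low = x7
  generalize PySem.Chars.isIn "comprehensive".toList low = x8
  generalize (PySem.Chars.isIn "time".toList low || (PySem.Chars.isIn "deadline".toList low || (PySem.Chars.isIn "when".toList low || (PySem.Chars.isIn "soon".toList low || PySem.Chars.isIn "quick".toList low)))) = g1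
  generalize (PySem.Chars.isIn "budget".toList low || (PySem.Chars.isIn "cost".toList low || (PySem.Chars.isIn "price".toList low || (PySem.Chars.isIn "money".toList low || PySem.Chars.isIn "free".toList low)))) = g2
  generalize (PySem.Chars.isIn "technology".toList low || (PySem.Chars.isIn "tech".toList low || (PySem.Chars.isIn "platform".toList low || PySem.Chars.isIn "database".toList low))) = g3
  generalize (PySem.Chars.isIn "user".toList low || (PySem.Chars.isIn "customer".toList low || (PySem.Chars.isIn "audience".toList low || PySem.Chars.isIn "people".toList low))) = g4
  revert x1 x2 x3 x4 x5 x6 x7 x8 g1 g2 g3 g4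
  decide
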